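-- pv_equiv track=rewrite | github.com/akhatkulov/UzChipher-CLI | cipher_codes/mirage_crypto.py | en_mirage
-- ===== SOURCE A (Python) =====
-- mirage_elements = {
--     "◤": "Q","⍚": "W","♚": "E",
--     "≥": "R",">": "T","-": "Y",
--     "<": "U","⊺": "I","Y": "O",
--     "z": "P","♝": "A","≤": "S",
--     "♛": "D","∞": "F","♕": "G",
--     "△": "H","⋮": "J","=": "K",
--     "≠": "L","+": "Z","√": "X",
--     "♥️": "C","±": "V","♜": "B",
--     "x": "N","卐": "M","♖": "Ш",
--     "♗": "Ch","♘": "Ng","♔'": "O",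
--     "㈤": "'","㈢": "-"
-- }
--
-- def en_mirage(text):
--     text = text.upper()
--     mirage_result = ""
--     for i in text:
--         for key, value in mirage_elements.items():
--             if i == value:
--                 mirage_result+=key;
--     return mirage_result;
-- ===== SOURCE B (Python) =====
-- # Direct inverse table: cipher letter -> concatenation of all mirage symbols that
-- # encode it (duplicate-valued entries of the original table concatenate in
-- # insertion order, e.g. "O" -> "Y" then "\u2654'").  The two multi-letter values
-- # "Ch"/"Ng" of the original table can never equal a single character, so they
-- # contribute nothing and have no single-character inverse entry.
-- inverse = {
--     "Q": "◤", "W": "⍚", "E": "♚", "R": "≥", "T": ">", "Y": "-",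
--     "U": "<", "I": "⊺", "O": "Y♔'", "P": "z", "A": "♝", "S": "≤",
--     "D": "♛", "F": "∞", "G": "♕", "H": "△", "J": "⋮", "K": "=",
--     "L": "≠", "Z": "+", "X": "√", "C": "♥️", "V": "±", "B": "♜",
--     "N": "x", "M": "卐", "Ш": "♖", "'": "㈤", "-": "㈢",
-- }
--
-- def en_mirage(text):
--     return "".join(inverse.get(ch, "") for ch in text.upper())
-- ===== Notes on version B (the rewrite author's own statement) =====
-- stated objective: faster
-- what changed: Replaces A's per-character rescan of the whole 31-entry cipher table by a directly written inverse table (cipher letter -> concatenated mirage symbols, duplicate-valued entries pre-merged in insertion order), so each character costs one dictionary lookup joined into the result.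
import Mathlib
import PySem

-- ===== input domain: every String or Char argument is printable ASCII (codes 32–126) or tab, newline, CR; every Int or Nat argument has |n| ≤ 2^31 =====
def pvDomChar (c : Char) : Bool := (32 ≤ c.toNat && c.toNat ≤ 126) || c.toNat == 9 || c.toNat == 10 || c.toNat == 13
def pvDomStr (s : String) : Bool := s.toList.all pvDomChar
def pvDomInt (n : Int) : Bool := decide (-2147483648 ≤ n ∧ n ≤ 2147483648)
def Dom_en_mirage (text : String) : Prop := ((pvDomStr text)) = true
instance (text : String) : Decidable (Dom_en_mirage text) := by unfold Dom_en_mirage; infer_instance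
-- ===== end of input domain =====

-- B drops A's per-character rescan of the whole 31-entry cipher table: it looks each
-- character up in a directly written inverse table (letter -> concatenated mirage symbols),
-- one O(1) lookup per character (objective: faster, constant-factor).

-- ===== PORT A =====
-- the module-level table mirage_elements, as (key, value) pairs of char lists, in insertion order
def mirageElements : List (List Char × List Char) :=
  [(['◤'], ['Q']), (['⍚'], ['W']), (['♚'], ['E']),
   (['≥'], ['R']), (['>'], ['T']), (['-'], ['Y']),
   (['<'], ['U']), (['⊺'], ['I']), (['Y'], ['O']),
   (['z'], ['P']), (['♝'], ['A']), (['≤'], ['S']),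
   (['♛'], ['D']), (['∞'], ['F']), (['♕'], ['G']),
   (['△'], ['H']), (['⋮'], ['J']), (['='], ['K']),
   (['≠'], ['L']), (['+'], ['Z']), (['√'], ['X']),
   (['♥', '\uFE0F'], ['C']), (['±'], ['V']), (['♜'], ['B']),
   (['x'], ['N']), (['卐'], ['M']), (['♖'], ['Ш']),
   (['♗'], ['C', 'h']), (['♘'], ['N', 'g']), (['♔', '\''], ['O']),
   (['㈤'], ['\'']), (['㈢'], ['-'])]

-- for i in text: for key, value in mirage_elements.items(): if i == value: mirage_result += key
def en_mirage (text : String) : String :=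
  let t := PySem.Str.upper text
  String.ofList (t.toList.foldl (fun acc i =>
    mirageElements.foldl (fun acc2 kv =>
      if [i] = kv.2 then acc2 ++ kv.1 else acc2) acc) [])

-- ===== PORT B =====
-- the directly written inverse table of Source B: cipher letter -> concatenated mirage symbols
def inverseMirage : PySem.Dict String String :=
  PySem.Dict.ofList
    [("Q", "◤"), ("W", "⍚"), ("E", "♚"), ("R", "≥"), ("T", ">"), ("Y", "-"),
     ("U", "<"), ("I", "⊺"), ("O", "Y♔'"), ("P", "z"), ("A", "♝"), ("S", "≤"),
     ("D", "♛"), ("F", "∞"), ("G", "♕"), ("H", "△"), ("J", "⋮"), ("K", "="),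
     ("L", "≠"), ("Z", "+"), ("X", "√"), ("C", "♥️"), ("V", "±"), ("B", "♜"),
     ("N", "x"), ("M", "卐"), ("Ш", "♖"), ("'", "㈤"), ("-", "㈢")]

-- ''.join(inverse.get(ch, '') for ch in text.upper())
def en_mirage_alt (text : String) : String :=
  PySem.Str.join ""
    ((PySem.Str.upper text).toList.map (fun ch => inverseMirage.getD (String.singleton ch) ""))

-- ===== PRECONDITION & SPEC =====
def Spec_en_mirage (text : String) (out : String) : Prop := out = en_mirage_alt text
instance (text : String) (out : String) : Decidable (Spec_en_mirage text out) := by unfold Spec_en_mirage; infer_instance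

-- ===== CLAIM (what is proved, stated in full; the proofs are below) =====
def Claim_equal_en_mirage : Prop := ∀ (text : String), Dom_en_mirage text → Spec_en_mirage text (en_mirage text)

-- ===== LEMMAS AND PROOFS =====

-- A's inner scan over the table, with an empty accumulator
def scanTable (i : Char) : List Char :=
  mirageElements.foldl (fun acc2 kv => if [i] = kv.2 then acc2 ++ kv.1 else acc2) []

lemma inner_body_eq (i : Char) :
    (fun (acc2 : List Char) (kv : List Char × List Char) => if [i] = kv.2 then acc2 ++ kv.1 else acc2)
      = (fun acc2 kv => acc2 ++ (if [i] = kv.2 then kv.1 else [])) := by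
  funext a kv; split <;> simp

lemma inner_scan_acc (i : Char) (acc : List Char) :
    mirageElements.foldl (fun acc2 kv => if [i] = kv.2 then acc2 ++ kv.1 else acc2) acc
      = acc ++ scanTable i := by
  rw [scanTable, inner_body_eq, PySem.List.foldl_append_eq_flatMap,
      PySem.List.foldl_append_eq_flatMap]
  simp

set_option maxRecDepth 40000 in
lemma scanTable_eq_lookup_of_ascii :
    ∀ n ∈ List.range 128,
      scanTable (Char.ofNat n) = (inverseMirage.getD (String.singleton (Char.ofNat n)) "").toList := by
  decide

lemma scanTable_eq_lookup (c : Char) (hc : c.toNat < 128) :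
    scanTable c = (inverseMirage.getD (String.singleton c) "").toList := by
  have := scanTable_eq_lookup_of_ascii c.toNat (List.mem_range.2 hc)
  simpa using this

lemma upper_mem_dom (text : String) (h : Dom_en_mirage text) :
    ∀ c ∈ (PySem.Str.upper text).toList, c.toNat < 128 := by
  intro c hc
  simp only [Dom_en_mirage, pvDomStr, List.all_eq_true] at h
  simp only [pysem] at hc
  rcases List.mem_map.1 hc with ⟨d, hd, rfl⟩
  have hd' := h d hd
  simp only [pvDomChar, Bool.or_eq_true, Bool.and_eq_true, decide_eq_true_eq, beq_iff_eq] at hd'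
  unfold PySem.Chars.upperChar
  split
  · rw [Char.toNat_ofNat]
    split <;> omega
  · omega

lemma intercalate_nil_flatten (xss : List (List Char)) : List.intercalate [] xss = xss.flatten := by
  induction xss with
  | nil => rfl
  | cons x xs ih =>
    cases xs with
    | nil => simp [List.intercalate]
    | cons y ys =>
      simp only [List.intercalate, List.intersperse] at *
      simp_all

lemma chars_join_nil_flatten (xss : List (List Char)) :
    PySem.Chars.join [] xss = xss.flatten := by
  simp [PySem.Chars.join, intercalate_nil_flatten]

theorem en_mirage_spec : Claim_equal_en_mirage := by
  intro text h
  unfold Spec_en_mirage en_mirage en_mirage_alt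
  dsimp only
  have h1 : (PySem.Str.upper text).toList.foldl
      (fun acc i => mirageElements.foldl (fun acc2 kv => if [i] = kv.2 then acc2 ++ kv.1 else acc2) acc) []
      = (PySem.Str.upper text).toList.foldl (fun acc i => acc ++ scanTable i) [] := by
    apply PySem.List.foldl_congr_mem
    intro acc x _
    exact inner_scan_acc x acc
  rw [h1, PySem.List.foldl_append_eq_flatMap, List.nil_append]
  apply String.toList_inj.mp
  simp only [String.toList_ofList, PySem.Str.toList_join, List.map_map]
  rw [show ("" : String).toList = [] from rfl, chars_join_nil_flatten, List.flatMap_def,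
      List.map_congr_left (fun c hc => scanTable_eq_lookup c (upper_mem_dom text h c hc))]
  simp only [Function.comp_def]
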